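-- pv_equiv track=rewrite | github.com/texttechnologylab/duui-uima-reader | duui-dt_neg-reader/src/dtneg_reader_utils/dtneg_reader.py | adjust_offsets
-- ===== SOURCE A (Python) =====
-- from typing import Union, Tuple, List, Any
--
-- def adjust_offsets(original_string: str,
--                    token_offsets: List[Tuple[int, int]],
--                    replacements: List[Tuple[str, str]]) -> Tuple[str, List[Tuple[int, int]]]:
--
--     # Apply replacements and track changes
--     for old, new in replacements:
--         while old in original_string:
--             pos_start = original_string.index(old)
--             pos_end = pos_start + len(old)
--             original_string = original_string.replace(old, new, 1)
--             delta = len(new) - len(old)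
--             for idx, token in enumerate(token_offsets):
--                 if token[0] < pos_start and token[1] <= pos_start:
--                     pass
--                 elif token[0] >= pos_end and token[1] > pos_end:
--                     token_offsets[idx] = (token[0] + delta, token[1] + delta)
--                 else:
--                     token_offsets[idx] = (token[0], token[1] + delta)
--
--     return original_string, token_offsets
-- ===== SOURCE B (Python) =====
-- def adjust_offsets(original_string, token_offsets, replacements):
--     # Phase 1: perform all replacements, recording (pos_start, pos_end, delta) events.
--     s = original_string
--     events = []
--     for old, new in replacements:
--         delta = len(new) - len(old)
--         i = s.find(old)
--         while i != -1:
--             s = s[:i] + new + s[i + len(old):]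
--             events.append((i, i + len(old), delta))
--             i = s.find(old)
--     # Phase 2: replay the events over each token once.
--     def adjust(token):
--         a, b = token
--         for ps, pe, d in events:
--             if a < ps and b <= ps:
--                 pass
--             elif a >= pe and b > pe:
--                 a, b = a + d, b + d
--             else:
--                 b = b + d
--         return (a, b)
--     return s, [adjust(t) for t in token_offsets]
-- ===== Notes on version B (the rewrite author's own statement) =====
-- stated objective: alternative
-- what changed: B decouples string rewriting from offset bookkeeping: it first performs all replacements (one find per iteration instead of A's in/index/replace triple scan), recording a (pos_start, pos_end, delta) event per replacement, then replays the event list over each token once (loop interchange), instead of A's re-scan and rewrite of the whole token list inside the replacement loop.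
import Mathlib
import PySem

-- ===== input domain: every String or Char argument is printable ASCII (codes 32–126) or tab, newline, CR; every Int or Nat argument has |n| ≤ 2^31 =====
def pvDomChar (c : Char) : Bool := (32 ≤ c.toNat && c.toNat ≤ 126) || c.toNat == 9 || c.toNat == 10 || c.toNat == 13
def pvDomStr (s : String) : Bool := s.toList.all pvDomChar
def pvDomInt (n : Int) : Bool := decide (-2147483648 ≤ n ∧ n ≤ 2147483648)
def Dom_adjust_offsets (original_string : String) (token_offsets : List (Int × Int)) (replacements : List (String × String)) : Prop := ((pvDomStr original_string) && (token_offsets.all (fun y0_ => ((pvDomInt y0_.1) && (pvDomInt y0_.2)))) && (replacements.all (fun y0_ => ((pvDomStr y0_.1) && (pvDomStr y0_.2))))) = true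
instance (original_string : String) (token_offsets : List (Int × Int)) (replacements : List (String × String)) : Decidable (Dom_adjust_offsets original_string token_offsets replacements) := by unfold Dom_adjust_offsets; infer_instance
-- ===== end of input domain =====

-- B decouples string rewriting from offset bookkeeping: it first performs all replacements
-- recording (pos_start, pos_end, delta) events, then replays the events over each token once
-- (objective: alternative decomposition, same asymptotic cost). Python A mutates token_offsets
-- in place; B does not — the equivalence proved here is about the RETURN value only.

-- ===== PORT A =====
-- inner 'while old in original_string' loop of A, carrying (string, token_offsets).
-- The Python loop is unbounded and diverges on some inputs (e.g. an empty 'old', or a 'new'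
-- that re-creates 'old'); the port makes the same computation total with a fuel guard of
-- 4^|s| + 1 replacement steps, counted from the string at loop entry (both ports use the
-- identical guard, so nothing about A = B depends on it).
-- 's.replace(old, new, 1)' replaces exactly the leftmost occurrence, which starts at
-- pos_start = s.index(old) = PySem.Chars.find s old (exact: the 'old in s' guard holds).
def pvWhileA (old new : List Char) (fuel : Nat) (s : List Char) (toks : List (Int × Int)) :
    List Char × List (Int × Int) :=
  match fuel with
  | 0 => (s, toks)
  | Nat.succ fuel =>
    if PySem.Chars.isIn old s then
      let pos_start : Int := PySem.Chars.find s old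
      let pos_end : Int := pos_start + old.length
      let s' := s.take pos_start.toNat ++ new ++ s.drop pos_end.toNat
      let delta : Int := (new.length : Int) - (old.length : Int)
      let toks' := toks.map (fun token =>
        if token.1 < pos_start ∧ token.2 ≤ pos_start then token
        else if pos_end ≤ token.1 ∧ pos_end < token.2 then (token.1 + delta, token.2 + delta)
        else (token.1, token.2 + delta))
      pvWhileA old new fuel s' toks'
    else (s, toks)

def pvRepA (st : List Char × List (Int × Int)) (rep : String × String) :
    List Char × List (Int × Int) :=
  pvWhileA rep.1.toList rep.2.toList (4 ^ st.1.length + 1) st.1 st.2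

def adjust_offsets (original_string : String) (token_offsets : List (Int × Int)) (replacements : List (String × String)) : String × (List (Int × Int)) :=
  let r := replacements.foldl pvRepA (original_string.toList, token_offsets)
  (String.ofList r.1, r.2)

-- ===== PORT B =====
-- inner 'while i != -1' loop of B: rewrite the string, appending one (pos_start, pos_end, delta)
-- event per replacement made (same fuel discipline as pvWhileA).
def pvWhileB (old new : List Char) (delta : Int) (fuel : Nat) (s : List Char)
    (evs : List (Int × Int × Int)) : List Char × List (Int × Int × Int) :=
  match fuel with
  | 0 => (s, evs)
  | Nat.succ fuel =>
    let i : Int := PySem.Chars.find s old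
    if i = -1 then (s, evs)
    else
      let s' := s.take i.toNat ++ new ++ s.drop (i.toNat + old.length)
      pvWhileB old new delta fuel s' (evs ++ [(i, i + old.length, delta)])

def pvRepB (st : List Char × List (Int × Int × Int)) (rep : String × String) :
    List Char × List (Int × Int × Int) :=
  pvWhileB rep.1.toList rep.2.toList ((rep.2.toList.length : Int) - (rep.1.toList.length : Int))
    (4 ^ st.1.length + 1) st.1 st.2

-- B's 'adjust': replay the recorded events over one token.
def pvAdjustTok (evs : List (Int × Int × Int)) (token : Int × Int) : Int × Int :=
  evs.foldl (fun t e =>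
    if t.1 < e.1 ∧ t.2 ≤ e.1 then t
    else if e.2.1 ≤ t.1 ∧ e.2.1 < t.2 then (t.1 + e.2.2, t.2 + e.2.2)
    else (t.1, t.2 + e.2.2)) token

def adjust_offsets_alt (original_string : String) (token_offsets : List (Int × Int)) (replacements : List (String × String)) : String × (List (Int × Int)) :=
  let r := replacements.foldl pvRepB (original_string.toList, [])
  (String.ofList r.1, token_offsets.map (pvAdjustTok r.2))

-- ===== PRECONDITION & SPEC =====
def Spec_adjust_offsets (original_string : String) (token_offsets : List (Int × Int)) (replacements : List (String × String)) (out : String × (List (Int × Int))) : Prop := out = adjust_offsets_alt original_string token_offsets replacements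
instance (original_string : String) (token_offsets : List (Int × Int)) (replacements : List (String × String)) (out : String × (List (Int × Int))) : Decidable (Spec_adjust_offsets original_string token_offsets replacements out) := by unfold Spec_adjust_offsets; infer_instance

-- ===== CLAIM (what is proved, stated in full; the proofs are below) =====
def Claim_equal_adjust_offsets : Prop := ∀ (original_string : String) (token_offsets : List (Int × Int)) (replacements : List (String × String)), Dom_adjust_offsets original_string token_offsets replacements → Spec_adjust_offsets original_string token_offsets replacements (adjust_offsets original_string token_offsets replacements)

-- ===== LEMMAS AND PROOFS =====

-- replaying a cons of events = one step, then the rest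
theorem pvAdjustTok_nil : pvAdjustTok [] = id := rfl

theorem pvAdjustTok_cons (e : Int × Int × Int) (evs : List (Int × Int × Int)) (t : Int × Int) :
    pvAdjustTok (e :: evs) t =
      pvAdjustTok evs
        (if t.1 < e.1 ∧ t.2 ≤ e.1 then t
         else if e.2.1 ≤ t.1 ∧ e.2.1 < t.2 then (t.1 + e.2.2, t.2 + e.2.2)
         else (t.1, t.2 + e.2.2)) := rfl

theorem pvAdjustTok_append (evs1 evs2 : List (Int × Int × Int)) (t : Int × Int) :
    pvAdjustTok (evs1 ++ evs2) t = pvAdjustTok evs2 (pvAdjustTok evs1 t) := by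
  simp [pvAdjustTok, List.foldl_append]

-- pvWhileB's accumulator only ever grows by appending
theorem pvWhileB_acc (old new : List Char) (delta : Int) (fuel : Nat) :
    ∀ (s : List Char) (evs : List (Int × Int × Int)),
    pvWhileB old new delta fuel s evs =
      ((pvWhileB old new delta fuel s []).1, evs ++ (pvWhileB old new delta fuel s []).2) := by
  induction fuel with
  | zero => intro s evs; simp [pvWhileB]
  | succ fuel ih =>
    intro s evs
    simp only [pvWhileB]
    by_cases h : PySem.Chars.find s old = -1
    · simp [h]
    · simp only [h]
      rw [ih _ (evs ++ _), ih _ ([] ++ _)]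
      simp

-- the two inner loops agree: same string, A's tokens = B's event replay
theorem pvWhile_AB (old new : List Char) (fuel : Nat) :
    ∀ (s : List Char) (toks : List (Int × Int)),
    pvWhileA old new fuel s toks =
      ((pvWhileB old new ((new.length : Int) - (old.length : Int)) fuel s []).1,
        toks.map (pvAdjustTok
          (pvWhileB old new ((new.length : Int) - (old.length : Int)) fuel s []).2)) := by
  induction fuel with
  | zero => intro s toks; simp [pvWhileA, pvWhileB, pvAdjustTok_nil]
  | succ fuel ih =>
    intro s toks
    simp only [pvWhileA, pvWhileB]
    by_cases h : PySem.Chars.isIn old s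
    · have hfind : PySem.Chars.find s old ≠ -1 := by
        rw [PySem.Chars.find_ne_neg_one_iff]
        exact (PySem.Chars.isIn_iff_infix old s).mp h
      have hpos : (0 : Int) ≤ PySem.Chars.find s old := by
        rw [PySem.Chars.find_nonneg_iff]
        exact (PySem.Chars.isIn_iff_infix old s).mp h
      have hdrop : (PySem.Chars.find s old + (old.length : Int)).toNat
          = (PySem.Chars.find s old).toNat + old.length := by omega
      simp only [h, if_neg hfind, hdrop]
      rw [ih]
      rw [pvWhileB_acc old new _ fuel _ ([] ++ _)]
      simp only [List.nil_append, List.map_map]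
      refine congrArg₂ Prod.mk rfl ?_
      exact List.map_congr_left (fun t _ => by
        simp [Function.comp, pvAdjustTok_cons])
    · have hfind : PySem.Chars.find s old = -1 := by
        rw [PySem.Chars.find_eq_neg_one_iff]
        intro hin
        exact h ((PySem.Chars.isIn_iff_infix old s).mpr hin)
      simp [h, hfind, pvAdjustTok_nil]
-- the outer fold over replacements, B side: events accumulate by appending
theorem foldB_acc (reps : List (String × String)) :
    ∀ (s : List Char) (evs : List (Int × Int × Int)),
    reps.foldl pvRepB (s, evs) =
      ((reps.foldl pvRepB (s, [])).1, evs ++ (reps.foldl pvRepB (s, [])).2) := by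
  induction reps with
  | nil => intro s evs; simp
  | cons rep rest ih =>
    intro s evs
    simp only [List.foldl_cons]
    have h1 : pvRepB (s, evs) rep =
        ((pvRepB (s, []) rep).1, evs ++ (pvRepB (s, []) rep).2) := by
      simp only [pvRepB]
      exact pvWhileB_acc _ _ _ _ _ _
    rw [h1]
    rcases hP : pvRepB (s, []) rep with ⟨P1, P2⟩
    rw [ih P1 (evs ++ P2), ih P1 P2]
    simp

-- main invariant of the outer fold
theorem fold_AB (reps : List (String × String)) :
    ∀ (s : List Char) (toks : List (Int × Int)),
    reps.foldl pvRepA (s, toks) =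
      ((reps.foldl pvRepB (s, [])).1,
        toks.map (pvAdjustTok (reps.foldl pvRepB (s, [])).2)) := by
  induction reps with
  | nil => intro s toks; simp [pvAdjustTok_nil]
  | cons rep rest ih =>
    intro s toks
    simp only [List.foldl_cons]
    have h1 : pvRepA (s, toks) rep =
        ((pvRepB (s, []) rep).1, toks.map (pvAdjustTok (pvRepB (s, []) rep).2)) := by
      simp only [pvRepA, pvRepB]
      exact pvWhile_AB _ _ _ _ _
    rw [h1]
    rcases hP : pvRepB (s, []) rep with ⟨P1, P2⟩
    rw [ih P1 _]
    rw [foldB_acc rest P1 P2]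
    simp only [List.map_map]
    refine congrArg₂ Prod.mk rfl ?_
    exact List.map_congr_left (fun t _ => by
      simp [Function.comp, pvAdjustTok_append])

-- ===== VERDICT (by name: the statement is the Claim_ definition above) =====
theorem adjust_offsets_spec : Claim_equal_adjust_offsets := by
  intro original_string token_offsets replacements _
  unfold Spec_adjust_offsets adjust_offsets adjust_offsets_alt
  rw [fold_AB]
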